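-- pv_equiv track=rewrite | github.com/KhairulM/Python-Maze-Solver | MazeSolver.py | leftNodeOf
-- ===== SOURCE A (Python) =====
-- def leftNodeOf(dataNodes, nodeId) :
--     ## Mencari node kiri (satu baris) terdekat dari nodeId
--     leftNodeId = None
--     enum = nodeId
--
--     thisNode = dataNodes[nodeId]
--     thisNodeX = thisNode[1]
--     enum -= 1
--
--     while(enum >= 0):
--         if(dataNodes[enum][1] == thisNodeX):
--             leftNodeId = enum
--             break
--         else :
--             enum -= 1
--
--     return leftNodeId
-- ===== SOURCE B (Python) =====
-- def leftNodeOf(dataNodes, nodeId):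
--     # Forward scan: keep the LAST earlier index with the same x; equals the
--     # nearest earlier match that A finds by scanning backward with a break.
--     thisNodeX = dataNodes[nodeId][1]
--     result = None
--     for i in range(nodeId):
--         if dataNodes[i][1] == thisNodeX:
--             result = i
--     return result
-- ===== Notes on version B (the rewrite author's own statement) =====
-- stated objective: alternative
-- what changed: Replaces A's backward while-loop with early break by a forward fold over range(nodeId) that keeps the last matching index (no break); same O(n) cost, different traversal order.
import Mathlib
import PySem

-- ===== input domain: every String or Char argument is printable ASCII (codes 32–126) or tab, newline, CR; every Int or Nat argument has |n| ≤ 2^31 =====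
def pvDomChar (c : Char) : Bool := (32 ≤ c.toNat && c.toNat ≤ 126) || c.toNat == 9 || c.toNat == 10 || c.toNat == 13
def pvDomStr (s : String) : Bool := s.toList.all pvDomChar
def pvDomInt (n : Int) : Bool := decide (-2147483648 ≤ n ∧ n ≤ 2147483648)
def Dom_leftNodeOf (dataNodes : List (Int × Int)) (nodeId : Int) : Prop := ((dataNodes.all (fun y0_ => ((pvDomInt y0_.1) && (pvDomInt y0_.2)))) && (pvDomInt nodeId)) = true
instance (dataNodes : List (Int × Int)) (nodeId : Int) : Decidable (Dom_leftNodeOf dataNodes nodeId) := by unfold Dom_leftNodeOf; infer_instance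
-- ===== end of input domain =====

-- B replaces A's backward while-loop with early break by a forward fold keeping the last match; alternative decomposition, same cost.


-- ===== PORT A =====
-- A's while-loop: enum counts down from nodeId-1; fuel n encodes enum = n-1, so n = 0 is exactly 'enum < 0'.
-- dataNodes[enum] inside the loop is in range whenever it is reached under Pre_; the `none` branch is unreachable there.
def leftNodeOfLoopA (dataNodes : List (Int × Int)) (thisNodeX : Int) : Nat → Option Int
  | 0 => none
  | n + 1 =>
    match PySem.List.pyGet? dataNodes (n : Int) with
    | some p => if p.2 = thisNodeX then some (n : Int) else leftNodeOfLoopA dataNodes thisNodeX n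
    | none => none

def leftNodeOf (dataNodes : List (Int × Int)) (nodeId : Int) : Option Int :=
  match PySem.List.pyGet? dataNodes nodeId with
  | some thisNode => leftNodeOfLoopA dataNodes thisNode.2 nodeId.toNat   -- enum starts at nodeId-1, i.e. fuel nodeId
  | none => none    -- IndexError; excluded by Pre_

-- ===== PORT B =====
def leftNodeOf_alt (dataNodes : List (Int × Int)) (nodeId : Int) : Option Int :=
  match PySem.List.pyGet? dataNodes nodeId with
  | some thisNode =>
    (PySem.List.pyRange 0 nodeId 1).foldl
      (fun result i =>
        match PySem.List.pyGet? dataNodes i with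
        | some p => if p.2 = thisNode.2 then some i else result
        | none => result)   -- IndexError; unreachable under Pre_
      none
  | none => none    -- IndexError; excluded by Pre_

-- ===== PRECONDITION & SPEC =====
-- Pre_ excludes exactly the inputs where Python raises IndexError on dataNodes[nodeId] (both A and B raise there).
def Pre_leftNodeOf (dataNodes : List (Int × Int)) (nodeId : Int) : Prop :=
  PySem.Raise.InRange dataNodes.length nodeId
instance (dataNodes : List (Int × Int)) (nodeId : Int) : Decidable (Pre_leftNodeOf dataNodes nodeId) := by
  unfold Pre_leftNodeOf; infer_instance
def pvWitness_leftNodeOf : (List (Int × Int)) × Int := ([(0, 5), (1, 3), (2, 5)], 2)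

def Spec_leftNodeOf (dataNodes : List (Int × Int)) (nodeId : Int) (out : Option Int) : Prop := out = leftNodeOf_alt dataNodes nodeId
instance (dataNodes : List (Int × Int)) (nodeId : Int) (out : Option Int) : Decidable (Spec_leftNodeOf dataNodes nodeId out) := by unfold Spec_leftNodeOf; infer_instance

-- ===== CLAIM (what is proved, stated in full; the proofs are below) =====
def Claim_equal_leftNodeOf : Prop := ∀ (dataNodes : List (Int × Int)) (nodeId : Int), Dom_leftNodeOf dataNodes nodeId → Pre_leftNodeOf dataNodes nodeId → Spec_leftNodeOf dataNodes nodeId (leftNodeOf dataNodes nodeId)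

-- ===== LEMMAS AND PROOFS =====

-- The forward fold over 0..n-1 keeping the last match equals the backward scan with break
-- (n ≤ length so every index the scans touch is in range, as Pre_ guarantees).
theorem loopA_eq_foldl (dataNodes : List (Int × Int)) (x : Int) (n : Nat)
    (hn : n ≤ dataNodes.length) :
    leftNodeOfLoopA dataNodes x n =
      ((List.range n).map Int.ofNat).foldl
        (fun result i =>
          match PySem.List.pyGet? dataNodes i with
          | some p => if p.2 = x then some i else result
          | none => result)
        none := by
  induction n with
  | zero => simp [leftNodeOfLoopA]
  | succ n ih =>
    rw [List.range_succ, List.map_append]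
    simp only [List.map_cons, List.map_nil, List.foldl_append, List.foldl_cons, List.foldl_nil]
    simp only [leftNodeOfLoopA]
    cases h : PySem.List.pyGet? dataNodes (n : Int) with
    | none =>
      -- impossible: n < dataNodes.length, so dataNodes[n] exists
      rw [PySem.List.pyGet?_eq_none_iff] at h
      exact absurd (by simp only [PySem.Raise.InRange]; omega) h
    | some p => rw [← ih (by omega)]; rfl

theorem leftNodeOf_eq (dataNodes : List (Int × Int)) (nodeId : Int) (h : Pre_leftNodeOf dataNodes nodeId) :
    leftNodeOf dataNodes nodeId = leftNodeOf_alt dataNodes nodeId := by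
  unfold leftNodeOf leftNodeOf_alt
  cases hg : PySem.List.pyGet? dataNodes nodeId with
  | none => rfl
  | some t =>
    dsimp only
    have hpre := h
    simp only [Pre_leftNodeOf, PySem.Raise.InRange] at hpre
    rw [PySem.List.pyRange_one, loopA_eq_foldl dataNodes t.2 nodeId.toNat (by omega)]
    congr 1
    simp [Int.ofNat_eq_natCast]

-- ===== VERDICT (by name: the statement is the Claim_ definition above) =====
theorem leftNodeOf_spec : Claim_equal_leftNodeOf := by
  intro dataNodes nodeId _ hpre
  unfold Spec_leftNodeOf
  exact leftNodeOf_eq dataNodes nodeId hpre
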